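-- pv_equiv track=rewrite | github.com/open-assistants-lab/executive-assistant | src/executive_assistant/channels/management_commands.py | _parse_scope
-- ===== SOURCE A (Python) =====
-- def _parse_scope(args: list[str]) -> tuple[str, list[str]]:
--     scope = "context"
--     cleaned: list[str] = []
--     for arg in args:
--         lowered = arg.lower()
--         if lowered.startswith("scope=") or lowered.startswith("--scope="):
--             _, value = lowered.split("=", 1)
--             if value in {"context", "shared"}:
--                 scope = value
--                 continue
--         cleaned.append(arg)
--     return scope, cleaned
-- ===== SOURCE B (Python) =====
-- # A valid scope flag is exactly an argument whose lowercase form is one of four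
-- # literal strings (the two accepted prefixes each contain their only '=' at the
-- # end, so the post-'=' value is the whole remainder): table lookup, no split.
-- _SCOPE_FLAGS = {
--     "scope=context": "context",
--     "scope=shared": "shared",
--     "--scope=context": "context",
--     "--scope=shared": "shared",
-- }
--
--
-- def _parse_scope(args):
--     scope = next((_SCOPE_FLAGS[a.lower()] for a in reversed(args) if a.lower() in _SCOPE_FLAGS), "context")
--     cleaned = [a for a in args if a.lower() not in _SCOPE_FLAGS]
--     return scope, cleaned
-- ===== Notes on version B (the rewrite author's own statement) =====
-- stated objective: alternative
-- what changed: Replaces A's stateful loop with prefix tests and string splitting by a four-entry lookup table (a valid flag is exactly an arg whose lowercase form is one of four literals), consulted in two passes: a reversed search for the last valid flag and a filter for the cleaned list.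
import Mathlib
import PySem

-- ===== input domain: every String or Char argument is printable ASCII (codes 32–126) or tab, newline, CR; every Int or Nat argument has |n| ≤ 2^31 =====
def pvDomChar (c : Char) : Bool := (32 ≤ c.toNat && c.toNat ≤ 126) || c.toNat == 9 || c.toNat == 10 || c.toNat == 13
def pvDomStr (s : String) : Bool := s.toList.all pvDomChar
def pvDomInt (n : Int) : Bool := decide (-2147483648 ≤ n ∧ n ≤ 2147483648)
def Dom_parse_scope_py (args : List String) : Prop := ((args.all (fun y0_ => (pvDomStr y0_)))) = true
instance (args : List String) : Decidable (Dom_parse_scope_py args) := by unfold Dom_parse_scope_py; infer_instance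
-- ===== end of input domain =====

-- B replaces A's prefix-test + split loop by a four-entry lookup table (a valid
-- flag's lowercase form is exactly one of four literals) used in two passes;
-- objective: alternative algorithm, same O(n) cost.

-- ===== PORT A =====
-- literal transliteration of A's single loop: state (scope, cleaned), append = ++ [arg]
def parse_scope_step (st : String × List String) (arg : String) : String × List String :=
  let lowered := PySem.Str.lower arg
  if PySem.Str.startswith lowered "scope=" || PySem.Str.startswith lowered "--scope=" then
    -- '_, value = lowered.split("=", 1)': sep "=" ≠ "" so splitMax? is some, and the
    -- startswith guard guarantees at least two parts, so the getD defaults never fire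
    let value := ((PySem.Str.splitMax? lowered "=" 1).getD []).getD 1 ""
    if value = "context" || value = "shared" then (value, st.2)
    else (st.1, st.2 ++ [arg])
  else (st.1, st.2 ++ [arg])

def parse_scope_py (args : List String) : String × List String :=
  args.foldl parse_scope_step ("context", [])

-- ===== PORT B =====
-- the module-level table _SCOPE_FLAGS from Source B
def pvScopeFlags : PySem.Dict String String :=
  PySem.Dict.ofList
    [("scope=context", "context"), ("scope=shared", "shared"),
     ("--scope=context", "context"), ("--scope=shared", "shared")]

def parse_scope_py_alt (args : List String) : String × List String :=
  ((args.reverse.findSome? (fun a => PySem.Dict.get? pvScopeFlags (PySem.Str.lower a))).getD "context",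
   args.filter (fun a => !(PySem.Dict.contains pvScopeFlags (PySem.Str.lower a))))

-- ===== PRECONDITION & SPEC =====
def Spec_parse_scope_py (args : List String) (out : String × List String) : Prop := out = parse_scope_py_alt args
instance (args : List String) (out : String × List String) : Decidable (Spec_parse_scope_py args out) := by unfold Spec_parse_scope_py; infer_instance

-- ===== CLAIM =====
def Claim_equal_parse_scope_py : Prop := ∀ (args : List String), Dom_parse_scope_py args → Spec_parse_scope_py args (parse_scope_py args)

-- ===== LEMMAS AND PROOFS =====

-- splitOnMax.go with maxsplit 0 returns at once with the remainder as last piece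
theorem pv_go_zero (sep : List Char) (f : Nat) (l cur : List Char) (acc : List (List Char)) :
    PySem.Chars.splitOnMax.go sep f 0 l cur acc = ((cur.reverse ++ l) :: acc).reverse := by
  cases f <;> cases l <;> simp [PySem.Chars.splitOnMax.go]

theorem pv_split_scope (t : List Char) :
    PySem.Str.splitMax? (String.ofList ('s'::'c'::'o'::'p'::'e'::'='::t)) "=" 1
      = some ["scope", String.ofList t] := by
  simp [PySem.Str.splitMax?, PySem.Chars.splitMax?, PySem.Chars.splitOnMax, String.toList_ofList,
        PySem.Chars.splitOnMax.go, pv_go_zero]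

theorem pv_split_dscope (t : List Char) :
    PySem.Str.splitMax? (String.ofList ('-'::'-'::'s'::'c'::'o'::'p'::'e'::'='::t)) "=" 1
      = some ["--scope", String.ofList t] := by
  simp [PySem.Str.splitMax?, PySem.Chars.splitMax?, PySem.Chars.splitOnMax, String.toList_ofList,
        PySem.Chars.splitOnMax.go, pv_go_zero]

-- the table as a literal Dict (so the get?_mk_cons simp lemmas apply)
theorem pvScopeFlags_eq :
    pvScopeFlags = PySem.Dict.mk
      [("scope=context", "context"), ("scope=shared", "shared"),
       ("--scope=context", "context"), ("--scope=shared", "shared")] := by decide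

-- the heart of the equivalence: A's per-argument test equals B's table lookup
theorem pv_lookup_eq (l : String) :
    (if PySem.Str.startswith l "scope=" || PySem.Str.startswith l "--scope=" then
       (if ((PySem.Str.splitMax? l "=" 1).getD []).getD 1 "" = "context"
           || ((PySem.Str.splitMax? l "=" 1).getD []).getD 1 "" = "shared" then
          some (((PySem.Str.splitMax? l "=" 1).getD []).getD 1 "")
        else none)
     else none)
    = PySem.Dict.get? pvScopeFlags l := by
  by_cases h1 : PySem.Str.startswith l "scope=" = true
  · have hp : "scope=".toList <+: l.toList := by
      have := (PySem.Chars.startswith_iff l.toList "scope=".toList).mp (by simpa using h1)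
      simpa using this
    obtain ⟨t, ht⟩ := hp
    have hl : l = String.ofList ('s'::'c'::'o'::'p'::'e'::'='::t) := by
      have : l.toList = 's'::'c'::'o'::'p'::'e'::'='::t := by simpa using ht.symm
      calc l = String.ofList l.toList := by simp
        _ = _ := by rw [this]
    subst hl
    rw [pv_split_scope]
    by_cases hc : t = "context".toList
    · subst hc; decide
    · by_cases hs : t = "shared".toList
      · subst hs; decide
      · have hc' : String.ofList t ≠ "context" := by
          intro h; exact hc (by simpa using congrArg String.toList h)
        have hs' : String.ofList t ≠ "shared" := by
          intro h; exact hs (by simpa using congrArg String.toList h)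
        have e1 : ("scope=context" : String) ≠ String.ofList ('s'::'c'::'o'::'p'::'e'::'='::t) := by
          intro h
          have := congrArg String.toList h
          simp [String.toList_ofList] at this
          exact hc (by rw [← this]; rfl)
        have e2 : ("scope=shared" : String) ≠ String.ofList ('s'::'c'::'o'::'p'::'e'::'='::t) := by
          intro h
          have := congrArg String.toList h
          simp [String.toList_ofList] at this
          exact hs (by rw [← this]; rfl)
        have e3 : ("--scope=context" : String) ≠ String.ofList ('s'::'c'::'o'::'p'::'e'::'='::t) := by
          intro h
          have := congrArg String.toList h
          simp [String.toList_ofList] at this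
        have e4 : ("--scope=shared" : String) ≠ String.ofList ('s'::'c'::'o'::'p'::'e'::'='::t) := by
          intro h
          have := congrArg String.toList h
          simp [String.toList_ofList] at this
        simp [pvScopeFlags_eq, PySem.Dict.get?, hc', hs', e1, e2, e3, e4]
  · by_cases h2 : PySem.Str.startswith l "--scope=" = true
    · have hp : "--scope=".toList <+: l.toList := by
        have := (PySem.Chars.startswith_iff l.toList "--scope=".toList).mp (by simpa using h2)
        simpa using this
      obtain ⟨t, ht⟩ := hp
      have hl : l = String.ofList ('-'::'-'::'s'::'c'::'o'::'p'::'e'::'='::t) := by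
        have : l.toList = '-'::'-'::'s'::'c'::'o'::'p'::'e'::'='::t := by simpa using ht.symm
        calc l = String.ofList l.toList := by simp
          _ = _ := by rw [this]
      subst hl
      rw [pv_split_dscope]
      by_cases hc : t = "context".toList
      · subst hc; decide
      · by_cases hs : t = "shared".toList
        · subst hs; decide
        · have hc' : String.ofList t ≠ "context" := by
            intro h; exact hc (by simpa using congrArg String.toList h)
          have hs' : String.ofList t ≠ "shared" := by
            intro h; exact hs (by simpa using congrArg String.toList h)
          have e1 : ("scope=context" : String) ≠ String.ofList ('-'::'-'::'s'::'c'::'o'::'p'::'e'::'='::t) := by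
            intro h
            have := congrArg String.toList h
            simp [String.toList_ofList] at this
          have e2 : ("scope=shared" : String) ≠ String.ofList ('-'::'-'::'s'::'c'::'o'::'p'::'e'::'='::t) := by
            intro h
            have := congrArg String.toList h
            simp [String.toList_ofList] at this
          have e3 : ("--scope=context" : String) ≠ String.ofList ('-'::'-'::'s'::'c'::'o'::'p'::'e'::'='::t) := by
            intro h
            have := congrArg String.toList h
            simp [String.toList_ofList] at this
            exact hc (by rw [← this]; rfl)
          have e4 : ("--scope=shared" : String) ≠ String.ofList ('-'::'-'::'s'::'c'::'o'::'p'::'e'::'='::t) := by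
            intro h
            have := congrArg String.toList h
            simp [String.toList_ofList] at this
            exact hs (by rw [← this]; rfl)
          simp [pvScopeFlags_eq, PySem.Dict.get?, hc', hs', e1, e2, e3, e4]
    · have e1 : ("scope=context" : String) ≠ l := by
        intro h; apply h1; rw [← h]; decide
      have e2 : ("scope=shared" : String) ≠ l := by
        intro h; apply h1; rw [← h]; decide
      have e3 : ("--scope=context" : String) ≠ l := by
        intro h; apply h2; rw [← h]; decide
      have e4 : ("--scope=shared" : String) ≠ l := by
        intro h; apply h2; rw [← h]; decide
      simp only [PySem.Str.startswith_eq] at h1 h2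
      rw [show ("scope=" : String).toList = ['s','c','o','p','e','='] from rfl] at h1
      rw [show ("--scope=" : String).toList = ['-','-','s','c','o','p','e','='] from rfl] at h2
      simp [h1, h2, pvScopeFlags_eq, PySem.Dict.get?, e1, e2, e3, e4]

-- A's loop body, expressed through B's table lookup
theorem parse_scope_step_eq (st : String × List String) (arg : String) :
    parse_scope_step st arg
    = match PySem.Dict.get? pvScopeFlags (PySem.Str.lower arg) with
      | some v => (v, st.2)
      | none => (st.1, st.2 ++ [arg]) := by
  rw [← pv_lookup_eq (PySem.Str.lower arg)]
  simp only [parse_scope_step]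
  split_ifs <;> simp_all

-- 'a.lower() not in _SCOPE_FLAGS' as an isNone test on the same lookup
theorem pv_contains_eq (k : String) :
    (!(PySem.Dict.contains pvScopeFlags k)) = (PySem.Dict.get? pvScopeFlags k).isNone := by
  cases h : PySem.Dict.get? pvScopeFlags k <;>
    simp [PySem.Dict.contains_eq_isSome_get?, h]

-- loop invariant: the fold from any state is the reversed search + filter
theorem parse_scope_fold (args : List String) (s : String) (c : List String) :
    args.foldl parse_scope_step (s, c)
    = (((args.reverse.findSome? (fun a => PySem.Dict.get? pvScopeFlags (PySem.Str.lower a))).getD s),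
       c ++ args.filter (fun a => (PySem.Dict.get? pvScopeFlags (PySem.Str.lower a)).isNone)) := by
  induction args generalizing s c with
  | nil => simp
  | cons a t ih =>
    rw [List.foldl_cons, parse_scope_step_eq]
    cases h : PySem.Dict.get? pvScopeFlags (PySem.Str.lower a) with
    | some v => simp [ih, List.findSome?_append, h]
    | none => simp [ih, List.findSome?_append, h]

-- ===== VERDICT =====
theorem parse_scope_py_spec : Claim_equal_parse_scope_py := by
  intro args _
  unfold Spec_parse_scope_py parse_scope_py parse_scope_py_alt
  simp only [pv_contains_eq]
  exact parse_scope_fold args "context" []
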